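-- pv_equiv track=rewrite | github.com/monkeylyf/interviewjam | dynamic_programming/leetcode_Paint_House_II.py | smallest_two
-- ===== SOURCE A (Python) =====
-- def smallest_two(arr):
--     """"""
--     min1 = None
--     min2 = None
--
--     for i, val in enumerate(arr):
--         if min1 is None:
--             min1 = i
--         elif arr[min1] >= val:
--             min1, min2 = i, min1
--         elif min2 is None or arr[min2] >= val:
--             min2 = i
--         else:
--             pass
--     return min1, min2
-- ===== SOURCE B (Python) =====
-- def smallest_two(arr):
--     order = sorted(range(len(arr)), key=lambda i: (arr[i], -i))
--     return (order[0] if order else None,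
--             order[1] if len(order) > 1 else None)
-- ===== Notes on version B (the rewrite author's own statement) =====
-- stated objective: simpler
-- what changed: Replaces the running two-minimums scan with its branching state machine by sorting the indices once by (value, -index) and taking the first two of the sorted order.
import Mathlib
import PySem

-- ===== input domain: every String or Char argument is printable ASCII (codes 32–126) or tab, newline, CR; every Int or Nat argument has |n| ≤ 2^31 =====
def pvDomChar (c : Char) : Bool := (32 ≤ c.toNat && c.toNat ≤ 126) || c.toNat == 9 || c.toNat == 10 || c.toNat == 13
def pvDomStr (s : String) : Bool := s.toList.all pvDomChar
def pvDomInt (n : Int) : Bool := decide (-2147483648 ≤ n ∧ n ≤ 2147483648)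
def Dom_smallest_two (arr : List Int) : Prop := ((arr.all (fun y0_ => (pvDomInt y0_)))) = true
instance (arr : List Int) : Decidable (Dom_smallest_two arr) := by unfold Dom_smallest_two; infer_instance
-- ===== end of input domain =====

-- B replaces A's running two-minimums scan by sorting the indices once by (value, -index)
-- and taking the first two of that order (objective: simpler).

-- ===== PORT A =====
-- arr[min1] / arr[min2]: both indices are previously seen enumerate indices, always in
-- range, so pyGetD with default 0 is exact here (the default is never consulted).
def smallest_two (arr : List Int) : Option Int × Option Int :=
  (PySem.List.enumerate arr 0).foldl
    (fun st p =>
      match st with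
      | (none, m2) => (some p.1, m2)
      | (some m1, m2) =>
        if PySem.List.pyGetD arr m1 0 ≥ p.2 then (some p.1, some m1)
        else
          match m2 with
          | none => (some m1, some p.1)
          | some m2v =>
            if PySem.List.pyGetD arr m2v 0 ≥ p.2 then (some m1, some p.1)
            else (some m1, some m2v))
    (none, none)

-- ===== PORT B =====
-- arr[i] inside the key: i ranges over range(len(arr)), always in range, so pyGetD is exact.
def smallest_two_alt (arr : List Int) : Option Int × Option Int :=
  let order := PySem.List.sorted2 (PySem.List.pyRange 0 arr.length 1)
      (fun i => PySem.List.pyGetD arr i 0) (fun i => -i)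
  (order[0]?, order[1]?)

-- ===== PRECONDITION & SPEC =====
def Spec_smallest_two (arr : List Int) (out : Option Int × Option Int) : Prop := out = smallest_two_alt arr
instance (arr : List Int) (out : Option Int × Option Int) : Decidable (Spec_smallest_two arr out) := by unfold Spec_smallest_two; infer_instance

-- ===== CLAIM (what is proved, stated in full; the proofs are below) =====
def Claim_equal_smallest_two : Prop := ∀ (arr : List Int), Dom_smallest_two arr → Spec_smallest_two arr (smallest_two arr)

-- ===== LEMMAS AND PROOFS =====

-- the comparison sorted2 uses for the key (arr[i], -i)
def pvBef (arr : List Int) (a b : Int) : Bool :=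
  decide (PySem.List.pyGetD arr a 0 < PySem.List.pyGetD arr b 0) ||
    (!decide (PySem.List.pyGetD arr b 0 < PySem.List.pyGetD arr a 0) && decide (-a < -b))

-- the insertion-sorted order of the first n indices
def pvOrd (arr : List Int) (n : Nat) : List Int :=
  (PySem.List.pyRange 0 n 1).foldl (fun acc x => PySem.List.insertBy (pvBef arr) x acc) []

-- A's loop body, named for the proofs
def pvStep (arr : List Int) (st : Option Int × Option Int) (p : Int × Int) : Option Int × Option Int :=
  match st with
  | (none, m2) => (some p.1, m2)
  | (some m1, m2) =>
    if PySem.List.pyGetD arr m1 0 ≥ p.2 then (some p.1, some m1)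
    else
      match m2 with
      | none => (some m1, some p.1)
      | some m2v =>
        if PySem.List.pyGetD arr m2v 0 ≥ p.2 then (some m1, some p.1)
        else (some m1, some m2v)

lemma pvAlt_eq (arr : List Int) :
    smallest_two_alt arr = ((pvOrd arr arr.length)[0]?, (pvOrd arr arr.length)[1]?) := rfl

lemma pvA_eq (arr : List Int) :
    smallest_two arr = (PySem.List.enumerate arr 0).foldl (pvStep arr) (none, none) := rfl

lemma pvBef_lt (arr : List Int) (n a : Int) (h : a < n) :
    pvBef arr n a = (PySem.List.pyGetD arr a 0 ≥ PySem.List.pyGetD arr n 0 : Bool) := by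
  simp only [pvBef]
  by_cases h1 : PySem.List.pyGetD arr a 0 < PySem.List.pyGetD arr n 0 <;>
    by_cases h2 : PySem.List.pyGetD arr n 0 < PySem.List.pyGetD arr a 0 <;>
    simp [h1, h2] <;> omega

lemma pvRange_succ (n : Nat) :
    PySem.List.pyRange 0 ((n : Int) + 1) 1 = PySem.List.pyRange 0 (↑n) 1 ++ [(n : Int)] := by
  rw [PySem.List.pyRange_one_append 0 (n : Int) ((n : Int) + 1) (Int.natCast_nonneg n) (by omega),
    @PySem.List.pyRange_one_cons (n : Int) ((n : Int) + 1) (by omega)]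
  simp [PySem.List.pyRange]

lemma pvOrd_succ (arr : List Int) (n : Nat) :
    pvOrd arr (n + 1) = PySem.List.insertBy (pvBef arr) (n : Int) (pvOrd arr n) := by
  simp [pvOrd, pvRange_succ]

-- inserting a fresh largest index into the order acts on the first two entries exactly as A's loop body
lemma pvTop2_insert (arr : List Int) (n : Int) (ord : List Int) (hmem : ∀ m ∈ ord, m < n) :
    ((PySem.List.insertBy (pvBef arr) n ord)[0]?, (PySem.List.insertBy (pvBef arr) n ord)[1]?)
      = pvStep arr (ord[0]?, ord[1]?) (n, PySem.List.pyGetD arr n 0) := by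
  rcases ord with _ | ⟨a, tail⟩
  · simp [PySem.List.insertBy, pvStep]
  · have ha := pvBef_lt arr n a (hmem a List.mem_cons_self)
    by_cases hc : PySem.List.pyGetD arr a 0 ≥ PySem.List.pyGetD arr n 0
    · have hT : pvBef arr n a = true := by rw [ha]; simp [hc]
      simp [PySem.List.insertBy, hT, pvStep, hc]
    · have hF : pvBef arr n a = false := by rw [ha]; simp [hc]
      rcases tail with _ | ⟨b, t2⟩
      · simp [PySem.List.insertBy, hF, pvStep, hc]
      · have hb := pvBef_lt arr n b (hmem b (by simp))
        by_cases hc2 : PySem.List.pyGetD arr b 0 ≥ PySem.List.pyGetD arr n 0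
        · have hT2 : pvBef arr n b = true := by rw [hb]; simp [hc2]
          simp [PySem.List.insertBy, hF, hT2, pvStep, hc, hc2]
        · have hF2 : pvBef arr n b = false := by rw [hb]; simp [hc2]
          simp [PySem.List.insertBy, hF, hF2, pvStep, hc, hc2]

-- main induction: after scanning the first n elements, A's state is the first two of pvOrd
lemma pvMain (arr : List Int) (n : Nat) (hn : n ≤ arr.length) :
    (PySem.List.enumerate (arr.take n) 0).foldl (pvStep arr) (none, none)
        = ((pvOrd arr n)[0]?, (pvOrd arr n)[1]?)
      ∧ (∀ m ∈ pvOrd arr n, m < (n : Int)) := by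
  induction n with
  | zero => simp [pvOrd, PySem.List.pyRange]
  | succ k ih =>
    obtain ⟨ih1, ih2⟩ := ih (Nat.le_of_succ_le hn)
    have hk : k < arr.length := Nat.lt_of_succ_le hn
    have htake : arr.take (k + 1) = arr.take k ++ [arr[k]] := by
      rw [List.take_add_one]; simp [List.getElem?_eq_getElem hk]
    have henum : PySem.List.enumerate (arr.take (k + 1)) 0
        = PySem.List.enumerate (arr.take k) 0 ++ [((k : Int), arr[k])] := by
      rw [htake, PySem.List.enumerate_append]
      simp [PySem.List.enumerate, List.length_take, Nat.min_eq_left (Nat.le_of_lt hk)]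
    have hval : arr[k] = PySem.List.pyGetD arr (k : Int) 0 := by
      rw [PySem.List.pyGetD_natCast]
      simp [List.getD, List.getElem?_eq_getElem hk]
    refine ⟨?_, ?_⟩
    · rw [henum, List.foldl_append, ih1, pvOrd_succ, List.foldl_cons, List.foldl_nil, hval]
      exact (pvTop2_insert arr (k : Int) (pvOrd arr k) ih2).symm
    · intro m hm
      rw [pvOrd_succ, PySem.List.mem_insertBy] at hm
      rcases hm with rfl | hm
      · push_cast; omega
      · have := ih2 m hm; push_cast; push_cast at this; omega

-- ===== VERDICT (by name: the statement is the Claim_ definition above) =====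
theorem smallest_two_spec : Claim_equal_smallest_two := by
  intro arr _
  show smallest_two arr = smallest_two_alt arr
  have h := (pvMain arr arr.length le_rfl).1
  rw [List.take_length] at h
  rw [pvA_eq, pvAlt_eq]
  exact h
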